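-- pv_equiv track=rewrite | github.com/code-cold-love/DSProject | leetcode/problems/longest-chunked-palindrome-decomposition.py | longestDecomposition
-- ===== SOURCE A (Python) =====
-- def longestDecomposition(text: str) -> int:
--     i, j = 0, len(text) - 1
--     count = 0
--     left, right = '', ''
--     while i <= j:
--         left += text[i]
--         right = text[j] + right
--         if i == j:
--             break
--         else:
--             if left == right:
--                 left = ''
--                 right = ''
--                 count += 2
--         i += 1
--         j -= 1
--     if left != '' and right != '':  # 奇数个，中间剩余一个无配对的
--         count += 1
--     return count
-- ===== SOURCE B (Python) =====
-- def longestDecomposition(text: str) -> int: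
--     if not text:
--         return 0
--     n = len(text)
--     for k in range(1, n // 2 + 1):
--         if text[:k] == text[-k:]:
--             return 2 + longestDecomposition(text[k:n - k])
--     return 1
-- ===== Notes on version B (the rewrite author's own statement) =====
-- stated objective: simpler
-- what changed: A's while-loop accumulating left/right strings character by character with paired indices is replaced by a short recursion that finds the smallest k with prefix k = suffix k via slice comparisons and recurses on the middle of the string.
import Mathlib
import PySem

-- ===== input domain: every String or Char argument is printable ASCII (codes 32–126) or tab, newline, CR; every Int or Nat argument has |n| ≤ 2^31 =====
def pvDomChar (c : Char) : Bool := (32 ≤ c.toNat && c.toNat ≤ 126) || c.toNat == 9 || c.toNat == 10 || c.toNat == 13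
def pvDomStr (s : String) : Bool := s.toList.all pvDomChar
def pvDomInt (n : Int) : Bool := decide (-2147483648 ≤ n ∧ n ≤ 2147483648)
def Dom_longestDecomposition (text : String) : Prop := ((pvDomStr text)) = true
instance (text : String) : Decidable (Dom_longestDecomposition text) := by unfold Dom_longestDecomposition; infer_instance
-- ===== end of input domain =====

-- B replaces A's character-by-character two-pointer accumulation with a short recursion that
-- strips the smallest matching prefix/suffix chunk via slices (objective: simpler; same result).

-- ===== PORT A =====
-- A's while-loop over state (i, j, count, left, right). text[i] / text[j] are ported with
-- PySem.List.pyGetD: exact here because on every reached state with i ≤ j we have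
-- 0 ≤ i ≤ j < len(text) (i starts at 0 and only grows, j starts at len-1 and only shrinks),
-- so Python's indexing never raises.
def pvLoopA (cs : List Char) (i j count : Int) (left right : List Char) : Int :=
  if _h : i ≤ j then
    let left' := left ++ [PySem.List.pyGetD cs i ' ']
    let right' := PySem.List.pyGetD cs j ' ' :: right
    if i = j then
      (if left' ≠ [] ∧ right' ≠ [] then count + 1 else count)   -- break, then the trailing if
    else
      if left' = right' then pvLoopA cs (i + 1) (j - 1) (count + 2) [] []
      else pvLoopA cs (i + 1) (j - 1) count left' right'
  else
    (if left ≠ [] ∧ right ≠ [] then count + 1 else count)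
termination_by (j - i + 1).toNat
decreasing_by all_goals omega

def longestDecomposition (text : String) : Int :=
  pvLoopA text.toList 0 (PySem.Str.len text - 1) 0 [] []

-- ===== PORT B =====
-- B's 'for k in range(1, n//2+1): … break/else' is ported as find? over the Nat list
-- [1, …, n/2] (= range(1, n//2+1), exact since n = len(s) ≥ 0); the slices text[:k],
-- text[-k:], text[k:n-k] are PySem.List.slice with the same bounds.
def pvAltGo (s : List Char) : Int :=
  if s = [] then 0
  else
    match _hk : (List.range' 1 (s.length / 2)).find?
        (fun k : Nat => decide (PySem.List.slice s none (some (k : Int)) =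
                          PySem.List.slice s (some (-(k : Int))) none)) with
    | some k => 2 + pvAltGo (PySem.List.slice s (some (k : Int)) (some ((s.length : Int) - (k : Int))))
    | none => 1
termination_by s.length
decreasing_by
  have hmem := List.mem_of_find?_eq_some _hk
  rw [List.mem_range'_1] at hmem
  have hc : ((s.length : Int) - (k : Int)) = ((s.length - k : Nat) : Int) := by omega
  rw [hc, PySem.List.slice_natCast]
  simp only [List.length_take, List.length_drop]
  omega

def longestDecomposition_alt (text : String) : Int :=
  pvAltGo text.toList

-- ===== PRECONDITION & SPEC =====
def Spec_longestDecomposition (text : String) (out : Int) : Prop := out = longestDecomposition_alt text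
instance (text : String) (out : Int) : Decidable (Spec_longestDecomposition text out) := by unfold Spec_longestDecomposition; infer_instance

-- ===== CLAIM (what is proved, stated in full; the proofs are below) =====
def Claim_equal_longestDecomposition : Prop := ∀ (text : String), Dom_longestDecomposition text → Spec_longestDecomposition text (longestDecomposition text)

-- ===== LEMMAS AND PROOFS =====

-- B's search predicate, simplified on in-range k: it is exactly "prefix k = suffix k".
lemma pvPred_eq (s : List Char) (k : Nat) (hk : 0 < k) :
    (decide (PySem.List.slice s none (some (k : Int)) =
             PySem.List.slice s (some (-(k : Int))) none))
    = decide (s.take k = s.drop (s.length - k)) := by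
  rw [PySem.List.slice_to_natCast, PySem.List.slice_from_neg_natCast s k hk]

-- if every chunk size 1 ≤ k ≤ n/2 fails, B's search finds nothing
lemma pvFind_none (s : List Char)
    (hfail : ∀ k : Nat, 1 ≤ k → k ≤ s.length / 2 → s.take k ≠ s.drop (s.length - k)) :
    (List.range' 1 (s.length / 2)).find?
        (fun k : Nat => decide (PySem.List.slice s none (some (k : Int)) =
                          PySem.List.slice s (some (-(k : Int))) none)) = none := by
  rw [List.find?_eq_none]
  intro k hk
  rw [List.mem_range'_1] at hk
  rw [pvPred_eq s k (by omega)]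
  simpa using hfail k hk.1 (by omega)

-- and then B returns 1 on a nonempty string
lemma pvAltGo_one (s : List Char) (hs : s ≠ [])
    (hfail : ∀ k : Nat, 1 ≤ k → k ≤ s.length / 2 → s.take k ≠ s.drop (s.length - k)) :
    pvAltGo s = 1 := by
  rw [pvAltGo.eq_def, if_neg (by simpa using hs)]
  split
  · rename_i k heq
    rw [pvFind_none s hfail] at heq
    exact absurd heq (by simp)
  · rfl

-- if sizes 1..m fail and m+1 matches, B's search returns m+1
lemma pvFind_some (s : List Char) (m : Nat)
    (hm : 2 * (m + 1) ≤ s.length)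
    (hfail : ∀ k : Nat, 1 ≤ k → k ≤ m → s.take k ≠ s.drop (s.length - k))
    (hmatch : s.take (m + 1) = s.drop (s.length - (m + 1))) :
    (List.range' 1 (s.length / 2)).find?
        (fun k : Nat => decide (PySem.List.slice s none (some (k : Int)) =
                          PySem.List.slice s (some (-(k : Int))) none)) = some (m + 1) := by
  obtain ⟨L, hL⟩ : ∃ L, s.length / 2 - m = L + 1 := ⟨s.length / 2 - m - 1, by omega⟩
  have hsplit : List.range' 1 (s.length / 2) =
      List.range' 1 m ++ ((m + 1) :: List.range' (m + 2) L) := by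
    rw [show s.length / 2 = m + (s.length / 2 - m) by omega, ← List.range'_append, hL,
      List.range'_succ]
    simp [Nat.add_comm]
    omega
  rw [hsplit, List.find?_append]
  have h1 : (List.range' 1 m).find?
      (fun k : Nat => decide (PySem.List.slice s none (some (k : Int)) =
                        PySem.List.slice s (some (-(k : Int))) none)) = none := by
    rw [List.find?_eq_none]
    intro k hk
    rw [List.mem_range'_1] at hk
    rw [pvPred_eq s k (by omega)]
    simpa using hfail k hk.1 (by omega)
  rw [h1]
  rw [List.find?_cons_of_pos (by rw [pvPred_eq s (m+1) (by omega)]; simpa using hmatch)]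
  simp [Option.or]

-- …and then B strips the chunk of size m+1
lemma pvAltGo_step (s : List Char) (m : Nat)
    (hm : 2 * (m + 1) ≤ s.length)
    (hfail : ∀ k : Nat, 1 ≤ k → k ≤ m → s.take k ≠ s.drop (s.length - k))
    (hmatch : s.take (m + 1) = s.drop (s.length - (m + 1))) :
    pvAltGo s = 2 + pvAltGo ((s.drop (m + 1)).take (s.length - 2 * (m + 1))) := by
  have hs : s ≠ [] := by
    intro h; subst h; simp at hm
  rw [pvAltGo.eq_def, if_neg (by simpa using hs)]
  split
  · rename_i k heq
    rw [pvFind_some s m hm hfail hmatch] at heq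
    injection heq with heq
    subst heq
    have hc : ((s.length : Int) - ((m + 1 : Nat) : Int)) = ((s.length - (m + 1) : Nat) : Int) := by
      omega
    rw [hc, PySem.List.slice_natCast,
      show s.length - (m + 1) - (m + 1) = s.length - 2 * (m + 1) by omega]
  · rename_i heq
    rw [pvFind_some s m hm hfail hmatch] at heq
    exact absurd heq (by simp)

-- loop exit (i > j, i.e. 2*m = n): both sides agree
lemma pvLoopA_exit (cs : List Char) (lo n m : Nat) (c : Int) (s : List Char)
    (hseq : s = (cs.drop lo).take n)
    (hlen : lo + n ≤ cs.length)
    (hm : 2 * m = n)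
    (hfail : ∀ k : Nat, 1 ≤ k → k ≤ m → s.take k ≠ s.drop (n - k)) :
    pvLoopA cs ((lo : Int) + m) ((lo : Int) + n - 1 - m) c (s.take m) (s.drop (n - m))
      = c + pvAltGo s := by
  have hslen : s.length = n := by
    subst hseq; simp; omega
  rw [pvLoopA, dif_neg (by omega)]
  rcases Nat.eq_zero_or_pos n with hn | hn
  · have hs : s = [] := by
      have := hslen; rw [hn] at this; exact List.eq_nil_of_length_eq_zero this
    subst hs
    rw [pvAltGo.eq_def]
    simp
  · have hm0 : 0 < m := by omega
    rw [if_pos]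
    · rw [pvAltGo_one s (by intro h; subst h; simp at hslen; omega)
        (by intro k hk1 hk2; rw [hslen]; exact hfail k hk1 (by omega))]
    · refine ⟨fun hcon => ?_, fun hcon => ?_⟩
      · have := congrArg List.length hcon; simp [hslen] at this; omega
      · have := congrArg List.length hcon; simp [hslen] at this; omega

-- the main loop invariant: A's loop on segment cs[lo : lo+n] with m characters already
-- accumulated on each side (all smaller chunk sizes having failed) computes c + B(segment)
lemma pvLoopA_eq (cs : List Char) :
    ∀ (D : Nat), ∀ (lo n m : Nat) (c : Int) (s : List Char),
      s = (cs.drop lo).take n →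
      lo + n ≤ cs.length →
      2 * m ≤ n → n ≤ 2 * m + D →
      (∀ k : Nat, 1 ≤ k → k ≤ m → s.take k ≠ s.drop (n - k)) →
      pvLoopA cs ((lo : Int) + m) ((lo : Int) + n - 1 - m) c (s.take m) (s.drop (n - m))
        = c + pvAltGo s := by
  intro D
  induction D with
  | zero =>
    intro lo n m c s hseq hlen hm1 hm2 hfail
    exact pvLoopA_exit cs lo n m c s hseq hlen (by omega) hfail
  | succ D ih =>
    intro lo n m c s hseq hlen hm1 hm2 hfail
    rcases Nat.eq_or_lt_of_le hm1 with hEq | hlt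
    · exact pvLoopA_exit cs lo n m c s hseq hlen hEq hfail
    have hslen : s.length = n := by subst hseq; simp; omega
    -- loop guard holds
    rw [pvLoopA, dif_pos (by omega)]
    -- the two freshly extended accumulators
    have hmlt : m < n := by omega
    have hget_i : PySem.List.pyGetD cs ((lo : Int) + (m : Int)) ' ' = s[m]'(by omega) := by
      rw [show ((lo : Int) + (m : Int)) = ((lo + m : Nat) : Int) by push_cast; ring]
      rw [PySem.List.pyGetD_eq_getElem cs ' ' (by positivity) (by push_cast; omega)]
      subst hseq
      simp only [Int.toNat_natCast, List.getElem_take, List.getElem_drop]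
    have hget_j : PySem.List.pyGetD cs ((lo : Int) + (n : Int) - 1 - (m : Int)) ' '
        = s[n - 1 - m]'(by omega) := by
      rw [show ((lo : Int) + (n : Int) - 1 - (m : Int)) = ((lo + (n - 1 - m) : Nat) : Int) by
        push_cast; omega]
      rw [PySem.List.pyGetD_eq_getElem cs ' ' (by positivity) (by push_cast; omega)]
      subst hseq
      simp only [Int.toNat_natCast, List.getElem_take, List.getElem_drop]
    have hleft : s.take m ++ [PySem.List.pyGetD cs ((lo : Int) + (m : Int)) ' ']
        = s.take (m + 1) := by
      rw [hget_i, List.take_add_one, List.getElem?_eq_getElem (by omega)]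
      rfl
    have hright : PySem.List.pyGetD cs ((lo : Int) + (n : Int) - 1 - (m : Int)) ' '
          :: s.drop (n - m) = s.drop (n - (m + 1)) := by
      rw [hget_j, show n - (m + 1) = n - 1 - m by omega,
        List.drop_eq_getElem_cons (show n - 1 - m < s.length by omega),
        show n - m = (n - 1 - m) + 1 by omega]
    simp only [hleft, hright]
    by_cases hij : ((lo : Int) + (m : Nat)) = ((lo : Int) + (n : Nat) - 1 - (m : Nat))
    · -- i = j : odd middle, break; both sides give 1
      have hn : n = 2 * m + 1 := by omega
      rw [if_pos hij, if_pos]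
      · rw [pvAltGo_one s (by intro h; subst h; simp at hslen; omega)
          (by intro k hk1 hk2; rw [hslen]; exact hfail k hk1 (by omega))]
      · refine ⟨fun hcon => ?_, fun hcon => ?_⟩
        · have := congrArg List.length hcon; simp [hslen] at this; omega
        · have := congrArg List.length hcon; simp [hslen] at this; omega
    · rw [if_neg hij]
      have hn2 : 2 * (m + 1) ≤ n := by omega
      by_cases hm' : s.take (m + 1) = s.drop (n - (m + 1))
      · -- chunk of size m+1 matches: A resets, B strips
        rw [if_pos hm']
        have harith1 : ((lo : Int) + (m : Nat)) + 1 = (((lo + (m + 1)) : Nat) : Int) + (0 : Nat) := by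
          push_cast; ring
        have harith2 : ((lo : Int) + (n : Nat) - 1 - (m : Nat)) - 1
            = (((lo + (m + 1)) : Nat) : Int) + ((n - 2 * (m + 1) : Nat) : Int) - 1 - ((0 : Nat) : Int) := by
          push_cast; omega
        rw [harith1, harith2]
        have hseg : (s.drop (m + 1)).take (n - 2 * (m + 1))
            = (cs.drop (lo + (m + 1))).take (n - 2 * (m + 1)) := by
          subst hseq
          rw [List.drop_take, List.drop_drop, List.take_take,
            show min (n - 2 * (m + 1)) (n - (m + 1)) = n - 2 * (m + 1) by omega]
        have := ih (lo + (m + 1)) (n - 2 * (m + 1)) 0 (c + 2)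
          ((s.drop (m + 1)).take (n - 2 * (m + 1)))
          (by rw [hseg]) (by omega) (by omega) (by omega) (by intro k hk1 hk2; omega)
        simp only [List.take_zero, Nat.sub_zero] at this
        rw [show ((s.drop (m+1)).take (n - 2*(m+1))).drop (n - 2*(m+1)) = ([] : List Char) by
          apply List.drop_eq_nil_of_le; simp] at this
        rw [this]
        rw [pvAltGo_step s m (by omega) (by intro k h1 h2; rw [hslen]; exact hfail k h1 (by omega))
          (by rw [hslen]; exact hm')]
        rw [hslen]
        ring
      · -- chunk of size m+1 fails: A keeps accumulating
        rw [if_neg hm']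
        have harith1 : ((lo : Int) + (m : Nat)) + 1 = (lo : Int) + ((m + 1 : Nat) : Int) := by
          push_cast; ring
        have harith2 : ((lo : Int) + (n : Nat) - 1 - (m : Nat)) - 1
            = (lo : Int) + (n : Nat) - 1 - ((m + 1 : Nat) : Int) := by push_cast; ring
        rw [harith1, harith2]
        exact ih lo n (m + 1) c s hseq hlen (by omega) (by omega)
          (by intro k hk1 hk2
              rcases Nat.eq_or_lt_of_le hk2 with h | h
              · subst h; exact hm'
              · exact hfail k hk1 (by omega))

-- ===== VERDICT (by name: the statement is the Claim_ definition above) =====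
theorem longestDecomposition_spec : Claim_equal_longestDecomposition := by
  intro text _
  unfold Spec_longestDecomposition longestDecomposition longestDecomposition_alt
  rw [PySem.Str.len_eq]
  rcases Nat.eq_zero_or_pos text.toList.length with h0 | h0
  · have hs : text.toList = [] := List.eq_nil_of_length_eq_zero h0
    rw [hs]
    rw [pvLoopA, dif_neg (by simp)]
    rw [pvAltGo.eq_def]
    simp
  · have := pvLoopA_eq text.toList text.toList.length 0 text.toList.length 0 0 text.toList
      (by simp) (by simp) (by omega) (by omega) (by intro k hk1 hk2; omega)
    simp only [Nat.sub_zero, List.take_zero, Nat.cast_zero, add_zero,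
      zero_add, sub_zero] at this
    rw [show List.drop text.toList.length text.toList = ([] : List Char) from
      List.drop_length] at this
    exact this
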